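-- pv_equiv track=rewrite | github.com/haasii-s/chord-name | keys.py | note_fundamental_value
-- ===== SOURCE A (Python) =====
-- def note_fundamental_value(note):
--
--     key_root_fundamental_value = 0
--
--     for accidental in note:
--         if accidental == "#":
--             key_root_fundamental_value += 1
--         elif accidental == "b":
--             key_root_fundamental_value -= 1
--
--     return key_root_fundamental_value
-- ===== SOURCE B (Python) =====
-- def note_fundamental_value(note):
--     # Delete-and-measure: build the string without flats and the string without
--     # sharps; the difference of their lengths is (#sharps) - (#flats), since
--     # each deleted occurrence shortens the string by exactly one character.
--     return len(note.replace("b", "")) - len(note.replace("#", ""))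
-- ===== Notes on version B (the rewrite author's own statement) =====
-- stated objective: alternative
-- what changed: Instead of scanning with a running signed accumulator and per-character branches, B builds two filtered strings by deleting all flats and all sharps with str.replace and returns the difference of their lengths; no counter or per-character branch exists in B.
import Mathlib
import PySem

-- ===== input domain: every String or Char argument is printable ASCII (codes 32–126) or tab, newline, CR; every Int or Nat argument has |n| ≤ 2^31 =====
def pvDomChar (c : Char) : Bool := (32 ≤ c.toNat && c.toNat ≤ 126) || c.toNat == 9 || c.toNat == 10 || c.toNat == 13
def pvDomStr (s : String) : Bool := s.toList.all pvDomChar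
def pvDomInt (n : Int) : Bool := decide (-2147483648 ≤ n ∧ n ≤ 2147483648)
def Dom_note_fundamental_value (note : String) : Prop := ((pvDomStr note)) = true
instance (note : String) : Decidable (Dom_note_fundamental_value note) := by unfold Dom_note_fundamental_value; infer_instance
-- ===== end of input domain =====

-- B replaces A's signed-accumulator scan by deleting all flats and all sharps with
-- str.replace and subtracting the two filtered lengths (alternative decomposition).

-- ===== PORT A =====
def note_fundamental_value (note : String) : Int :=
  note.toList.foldl
    (fun acc c =>
      if c == '#' then acc + 1
      else if c == 'b' then acc - 1
      else acc) 0

-- ===== PORT B =====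
def note_fundamental_value_alt (note : String) : Int :=
  PySem.Str.len (PySem.Str.replace note "b" "") - PySem.Str.len (PySem.Str.replace note "#" "")

-- ===== PRECONDITION & SPEC =====
def Spec_note_fundamental_value (note : String) (out : Int) : Prop := out = note_fundamental_value_alt note
instance (note : String) (out : Int) : Decidable (Spec_note_fundamental_value note out) := by unfold Spec_note_fundamental_value; infer_instance

-- ===== CLAIM (what is proved, stated in full; the proofs are below) =====
def Claim_equal_note_fundamental_value : Prop := ∀ (note : String), Dom_note_fundamental_value note → Spec_note_fundamental_value note (note_fundamental_value note)

-- ===== LEMMAS AND PROOFS =====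

-- replace.go with a one-char needle and empty replacement filters that char out.
theorem replace_go_single_empty (o : Char) :
    ∀ (fuel : Nat) (l acc : List Char), l.length ≤ fuel →
      PySem.Chars.replace.go [o] [] fuel l acc = acc.reverse ++ l.filter (fun c => !(c == o)) := by
  intro fuel
  induction fuel with
  | zero =>
    intro l acc h
    have : l = [] := List.eq_nil_of_length_eq_zero (Nat.le_zero.mp h)
    subst this
    simp [PySem.Chars.replace.go]
  | succ n ih =>
    intro l acc h
    cases l with
    | nil => simp [PySem.Chars.replace.go]
    | cons x t =>
      simp only [PySem.Chars.replace.go]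
      by_cases hx : x = o
      · subst hx
        have hpre : List.isPrefixOf [x] (x :: t) = true := by simp [List.isPrefixOf]
        simp only [hpre, if_true, List.reverse_nil, List.nil_append, List.length, List.drop]
        rw [ih t acc (by simpa using Nat.succ_le_succ_iff.mp h)]
        simp
      · have hpre : List.isPrefixOf [o] (x :: t) = false := by
          simp [List.isPrefixOf]
          exact fun h => hx h.symm
        simp only [hpre, if_neg (by simp : ¬ (false = true))]
        rw [ih t (x :: acc) (by simpa using Nat.succ_le_succ_iff.mp h)]
        simp [hx]

theorem replace_single_empty (s : List Char) (o : Char) :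
    PySem.Chars.replace s [o] [] = s.filter (fun c => !(c == o)) := by
  have h := replace_go_single_empty o s.length s [] le_rfl
  simpa [PySem.Chars.replace, List.isEmpty] using h

-- A's accumulator loop computes acc + #('#') - #('b').
theorem foldl_sharps_flats (l : List Char) :
    ∀ (acc : Int),
      l.foldl (fun acc c => if c == '#' then acc + 1 else if c == 'b' then acc - 1 else acc) acc
        = acc + (l.count '#' : Int) - (l.count 'b' : Int) := by
  induction l with
  | nil => intro acc; simp
  | cons x t ih =>
    intro acc
    simp only [List.foldl_cons, List.count_cons]
    rw [ih]
    by_cases h1 : x = '#'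
    · subst h1; simp; omega
    · by_cases h2 : x = 'b'
      · subst h2; simp; omega
      · simp [h1, h2]

-- filtered length plus the count of the deleted char gives the full length.
theorem length_filter_ne (l : List Char) (o : Char) :
    (l.filter (fun c => !(c == o))).length + l.count o = l.length := by
  induction l with
  | nil => rfl
  | cons x t ih =>
    simp only [List.filter_cons, List.count_cons, List.length_cons]
    simp at ih ⊢
    by_cases hx : x = o
    · subst hx
      simp
      omega
    · simp [hx]
      omega

-- ===== VERDICT (by name: the statement is the Claim_ definition above) =====
theorem note_fundamental_value_spec : Claim_equal_note_fundamental_value := by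
  intro note _
  unfold Spec_note_fundamental_value note_fundamental_value note_fundamental_value_alt
  rw [foldl_sharps_flats]
  have hb := replace_single_empty note.toList 'b'
  have hs := replace_single_empty note.toList '#'
  simp only [PySem.Str.len_eq, PySem.Str.toList_replace]
  have : ("b" : String).toList = ['b'] := rfl
  rw [this]
  have : ("#" : String).toList = ['#'] := rfl
  rw [this]
  have : ("" : String).toList = [] := rfl
  rw [this, hb, hs]
  have h1 := length_filter_ne note.toList 'b'
  have h2 := length_filter_ne note.toList '#'
  omega
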